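-- pv_equiv track=rewrite | github.com/AlanValdevenito/Teoria-de-Algoritmos | PRIMERA-CURSADA/EJERCICIOS/GREEDY/greedy_9.py | minimizar_latencia
-- ===== SOURCE A (Python) =====
-- def minimizar_latencia(L_deadline, T_tareas):
--     tareas_ordenadas = sorted([(T_tareas[i], L_deadline[i]) for i in range(len(L_deadline))], key=lambda x: x[1])
--     tareas = []
--
--     S_i = 0
--     for i in range(len(tareas_ordenadas)):
--         T_i = tareas_ordenadas[i][0]
--         D_i = tareas_ordenadas[i][1]
--
--         L_i = (S_i + T_i) - D_i if (S_i + T_i) > D_i else 0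
--
--         S_i += T_i
--         tareas.append((T_i, L_i))
--
--     return tareas
-- ===== SOURCE B (Python) =====
-- def _mezclar(a, b):
--     # stable merge: on equal deadlines take from a (the left/earlier half) first
--     res = []
--     i = 0
--     j = 0
--     while i < len(a) and j < len(b):
--         if b[j][1] < a[i][1]:
--             res.append(b[j])
--             j += 1
--         else:
--             res.append(a[i])
--             i += 1
--     res.extend(a[i:])
--     res.extend(b[j:])
--     return res
--
--
-- def _msort(l):
--     # hand-written stable top-down merge sort by deadline
--     if len(l) <= 1:
--         return l
--     mid = len(l) // 2
--     return _mezclar(_msort(l[:mid]), _msort(l[mid:]))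
--
--
-- def minimizar_latencia(L_deadline, T_tareas):
--     pares = [(T_tareas[i], L_deadline[i]) for i in range(len(L_deadline))]
--     ordenadas = _msort(pares)
--     # back-to-front: the last task finishes at the total duration; walk the
--     # schedule in reverse, decrementing the finish time, then flip the output
--     s = sum(t for t, _ in ordenadas)
--     salida = []
--     for t, d in reversed(ordenadas):
--         salida.append((t, max(0, s - d)))
--         s -= t
--     salida.reverse()
--     return salida
-- ===== Notes on version B (the rewrite author's own statement) =====
-- stated objective: alternative
-- what changed: Replaces the library sort + forward accumulating loop with a hand-written stable top-down merge sort by deadline and a back-to-front lateness pass: the total duration is computed once, the sorted schedule is walked in reverse decrementing the finish time, and the output is built reversed and flipped at the end.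
import Mathlib
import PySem

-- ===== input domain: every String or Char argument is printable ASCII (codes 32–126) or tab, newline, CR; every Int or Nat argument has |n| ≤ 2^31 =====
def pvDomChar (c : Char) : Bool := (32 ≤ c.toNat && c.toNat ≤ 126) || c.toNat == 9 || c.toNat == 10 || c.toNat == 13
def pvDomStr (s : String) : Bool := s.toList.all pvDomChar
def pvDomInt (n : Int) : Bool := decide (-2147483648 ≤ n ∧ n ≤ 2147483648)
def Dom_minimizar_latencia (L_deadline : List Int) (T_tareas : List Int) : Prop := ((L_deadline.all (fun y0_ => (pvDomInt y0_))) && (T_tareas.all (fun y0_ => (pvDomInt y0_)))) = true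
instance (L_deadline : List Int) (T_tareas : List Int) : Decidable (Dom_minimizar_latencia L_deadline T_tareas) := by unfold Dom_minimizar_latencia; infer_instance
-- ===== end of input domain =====

-- B replaces the library sort + forward accumulating loop with a hand-written stable top-down
-- merge sort by deadline and a back-to-front lateness pass over the reversed schedule;
-- equivalence of return values proved for len(L_deadline) ≤ len(T_tareas) (otherwise A raises IndexError).


-- ===== PORT A =====
def minimizar_latencia (L_deadline : List Int) (T_tareas : List Int) : List (Int × Int) :=
  let tareas_ordenadas := PySem.List.sorted
    ((List.range L_deadline.length).map (fun (i : Nat) =>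
      ((PySem.List.pyGet? T_tareas (i : Int)).getD 0, (PySem.List.pyGet? L_deadline (i : Int)).getD 0)))
    (fun x => x.2) false
  (tareas_ordenadas.foldl (fun st p =>
      let T_i := p.1
      let D_i := p.2
      let L_i := if st.1 + T_i > D_i then (st.1 + T_i) - D_i else 0
      (st.1 + T_i, st.2 ++ [(T_i, L_i)]))
    ((0 : Int), ([] : List (Int × Int)))).2

-- ===== PORT B =====
-- _mezclar: the while loop over indices i, j becomes recursion on the two remaining suffixes
-- (a[i:], b[j:]), with the growing res list as accumulator; the two extends are the final appends.
def bMezclar : List (Int × Int) → List (Int × Int) → List (Int × Int) → List (Int × Int)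
  | x :: xs, y :: ys, res =>
      if y.2 < x.2 then bMezclar (x :: xs) ys (res ++ [y])
      else bMezclar xs (y :: ys) (res ++ [x])
  | a, b, res => res ++ a ++ b
termination_by a b _ => a.length + b.length

-- _msort: top-down merge sort; the Python slices l[:mid], l[mid:] are PySem slices.
def bMsort (l : List (Int × Int)) : List (Int × Int) :=
  if h : l.length ≤ 1 then l
  else
    let mid := l.length / 2
    bMezclar (bMsort (PySem.List.slice l none (some (mid : Int))))
             (bMsort (PySem.List.slice l (some (mid : Int)) none)) []
termination_by l.length
decreasing_by
  · rw [PySem.List.slice_to_natCast]; simp; omega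
  · rw [PySem.List.slice_from_natCast]; simp; omega

def minimizar_latencia_alt (L_deadline : List Int) (T_tareas : List Int) : List (Int × Int) :=
  let pares := (List.range L_deadline.length).map (fun (i : Nat) =>
      ((PySem.List.pyGet? T_tareas (i : Int)).getD 0, (PySem.List.pyGet? L_deadline (i : Int)).getD 0))
  let ordenadas := bMsort pares
  let s0 := (ordenadas.map (fun p => p.1)).sum
  let r := ordenadas.reverse.foldl (fun (st : Int × List (Int × Int)) p =>
      (st.1 - p.1, st.2 ++ [(p.1, max 0 (st.1 - p.2))])) (s0, ([] : List (Int × Int)))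
  r.2.reverse

-- ===== PRECONDITION & SPEC =====
-- A indexes T_tareas by every index of L_deadline, raising IndexError when T_tareas is shorter.
def Pre_minimizar_latencia (L_deadline : List Int) (T_tareas : List Int) : Prop :=
  L_deadline.length ≤ T_tareas.length
instance (L_deadline : List Int) (T_tareas : List Int) : Decidable (Pre_minimizar_latencia L_deadline T_tareas) := by unfold Pre_minimizar_latencia; infer_instance
def pvWitness_minimizar_latencia : List Int × List Int := ([2, 1], [5, 3])

def Spec_minimizar_latencia (L_deadline : List Int) (T_tareas : List Int) (out : List (Int × Int)) : Prop := out = minimizar_latencia_alt L_deadline T_tareas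
instance (L_deadline : List Int) (T_tareas : List Int) (out : List (Int × Int)) : Decidable (Spec_minimizar_latencia L_deadline T_tareas out) := by unfold Spec_minimizar_latencia; infer_instance

-- ===== CLAIM (what is proved, stated in full; the proofs are below) =====
def Claim_equal_minimizar_latencia : Prop := ∀ (L_deadline : List Int) (T_tareas : List Int), Dom_minimizar_latencia L_deadline T_tareas → Pre_minimizar_latencia L_deadline T_tareas → Spec_minimizar_latencia L_deadline T_tareas (minimizar_latencia L_deadline T_tareas)

-- ===== LEMMAS AND PROOFS =====

-- Reference recursion: lateness list of a (sorted) pair list starting at time s.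
def latRec : List (Int × Int) → Int → List (Int × Int)
  | [], _ => []
  | (t, d) :: rest, s => (t, if s + t > d then (s + t) - d else 0) :: latRec rest (s + t)

-- Pure (accumulator-free) stable merge, tie to the left.
def pmerge : List (Int × Int) → List (Int × Int) → List (Int × Int)
  | [], b => b
  | x :: xs, [] => x :: xs
  | x :: xs, y :: ys => if y.2 < x.2 then y :: pmerge (x :: xs) ys else x :: pmerge xs (y :: ys)
termination_by a b => a.length + b.length

-- B's reverse pass: lateness list of the reversed schedule, finish time counted down.
def revRec : List (Int × Int) → Int → List (Int × Int)
  | [], _ => []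
  | (t, d) :: rest, s => (t, max 0 (s - d)) :: revRec rest (s - t)

def sumT (ps : List (Int × Int)) : Int := (ps.map (fun p => p.1)).sum

-- A's fold is latRec.
theorem foldA_eq (ps : List (Int × Int)) (s : Int) (acc : List (Int × Int)) :
    (ps.foldl (fun st p =>
      let T_i := p.1
      let D_i := p.2
      let L_i := if st.1 + T_i > D_i then (st.1 + T_i) - D_i else 0
      (st.1 + T_i, st.2 ++ [(T_i, L_i)])) (s, acc)).2 = acc ++ latRec ps s := by
  induction ps generalizing s acc with
  | nil => simp [latRec]
  | cons p rest ih =>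
    obtain ⟨t, d⟩ := p
    simp only [List.foldl_cons, latRec, ih, List.append_assoc, List.singleton_append]

-- B's reverse fold is revRec.
theorem foldB_eq (l : List (Int × Int)) (s : Int) (acc : List (Int × Int)) :
    (l.foldl (fun (st : Int × List (Int × Int)) p =>
      (st.1 - p.1, st.2 ++ [(p.1, max 0 (st.1 - p.2))])) (s, acc)).2 = acc ++ revRec l s := by
  induction l generalizing s acc with
  | nil => simp [revRec]
  | cons p rest ih =>
    obtain ⟨t, d⟩ := p
    simp only [List.foldl_cons, revRec, ih, List.append_assoc, List.singleton_append]

theorem pmerge_nil_right (a : List (Int × Int)) : pmerge a [] = a := by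
  cases a <;> simp [pmerge]

-- bMezclar with accumulator computes pmerge.
theorem bMezclar_eq (a b res : List (Int × Int)) : bMezclar a b res = res ++ pmerge a b := by
  fun_induction bMezclar a b res with
  | case1 x xs y ys res h ih => simp [pmerge, h, ih]
  | case2 x xs y ys res h ih => simp [pmerge, h, ih]
  | case3 a b res h =>
    cases a with
    | nil => simp [pmerge]
    | cons x xs =>
      cases b with
      | nil => simp [pmerge]
      | cons y ys => exact (h x xs y ys rfl rfl).elim

theorem merge_single (a : List (Int × Int)) (y : Int × Int) :
    pmerge a [y] = PySem.List.insertBy (fun u v => decide (u.2 < v.2)) y a := by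
  induction a with
  | nil => simp [pmerge, PySem.List.insertBy]
  | cons x xs ih =>
    simp only [pmerge, PySem.List.insertBy, pmerge_nil_right, ih]
    by_cases h : y.2 < x.2 <;> simp [h]

-- inserting into a merge = merging with the insertion done on the right list.
theorem ins_merge (a : List (Int × Int)) : ∀ (b : List (Int × Int)) (y : Int × Int),
    PySem.List.insertBy (fun u v => decide (u.2 < v.2)) y (pmerge a b)
      = pmerge a (PySem.List.insertBy (fun u v => decide (u.2 < v.2)) y b) := by
  induction a with
  | nil => intro b y; simp [pmerge]
  | cons p as iha =>
    intro b
    induction b with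
    | nil =>
      intro y
      simp only [pmerge_nil_right, PySem.List.insertBy, merge_single]
    | cons q bs ihb =>
      intro y
      by_cases hqp : q.2 < p.2
      · -- merge takes q first
        simp only [pmerge, if_pos hqp]
        by_cases hyq : y.2 < q.2
        · have hyp : y.2 < p.2 := lt_trans hyq hqp
          simp [PySem.List.insertBy, pmerge, hyq, hyp, hqp]
        · simp only [PySem.List.insertBy, hyq, decide_false, Bool.false_eq_true, if_false, ihb]
          simp [pmerge, hqp]
      · -- merge takes p first
        simp only [pmerge, if_neg hqp]
        by_cases hyp : y.2 < p.2
        · have hyq : y.2 < q.2 := lt_of_lt_of_le hyp (not_lt.mp hqp)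
          simp [PySem.List.insertBy, pmerge, hyp, hyq, hqp]
        · by_cases hyq : y.2 < q.2
          · simp only [PySem.List.insertBy, hyp, hyq, decide_false, decide_true,
              Bool.false_eq_true, if_false, if_true, iha]
            simp [pmerge, hyp]
          · simp only [PySem.List.insertBy, hyp, hyq, decide_false, Bool.false_eq_true, if_false, iha]
            simp [pmerge, hqp]

theorem sorted_snoc (xs : List (Int × Int)) (x : Int × Int) :
    PySem.List.sorted (xs ++ [x]) (fun p => p.2) false
      = PySem.List.insertBy (fun u v => decide (u.2 < v.2)) x
          (PySem.List.sorted xs (fun p => p.2) false) := by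
  rw [PySem.List.sorted_eq_foldl_insertBy, PySem.List.sorted_eq_foldl_insertBy, List.foldl_append]
  simp

-- sorted over a concatenation is the stable merge of the sorted halves.
theorem merge_sorted (ys : List (Int × Int)) : ∀ xs : List (Int × Int),
    PySem.List.sorted (xs ++ ys) (fun p => p.2) false
      = pmerge (PySem.List.sorted xs (fun p => p.2) false)
               (PySem.List.sorted ys (fun p => p.2) false) := by
  induction ys using List.reverseRecOn with
  | nil => intro xs; simp [PySem.List.sorted, pmerge_nil_right]
  | append_singleton zs y ih =>
    intro xs
    rw [show xs ++ (zs ++ [y]) = (xs ++ zs) ++ [y] by simp, sorted_snoc, ih, ins_merge,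
      ← sorted_snoc]

theorem sorted_short (l : List (Int × Int)) (h : l.length ≤ 1) :
    PySem.List.sorted l (fun p => p.2) false = l := by
  apply PySem.List.sorted_eq_self_of_pairwise
  match l, h with
  | [], _ => simp
  | [x], _ => simp

-- the hand-written merge sort is Python's stable sort by deadline.
theorem bMsort_eq (l : List (Int × Int)) :
    bMsort l = PySem.List.sorted l (fun p => p.2) false := by
  fun_induction bMsort l with
  | case1 l h => rw [sorted_short l h]
  | case2 l h mid ih1 ih2 =>
    rw [bMezclar_eq, List.nil_append, ih1, ih2]
    simp only [PySem.List.slice_to_natCast, PySem.List.slice_from_natCast]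
    rw [← merge_sorted, List.take_append_drop]

theorem sumT_snoc (qs : List (Int × Int)) (p : Int × Int) :
    sumT (qs ++ [p]) = sumT qs + p.1 := by
  simp [sumT]

theorem latRec_snoc (qs : List (Int × Int)) : ∀ (s : Int) (p : Int × Int),
    latRec (qs ++ [p]) s
      = latRec qs s ++ [(p.1, if s + sumT qs + p.1 > p.2 then s + sumT qs + p.1 - p.2 else 0)] := by
  induction qs with
  | nil => intro s p; obtain ⟨t, d⟩ := p; simp [latRec, sumT]
  | cons q qs ih =>
    intro s p
    obtain ⟨t, d⟩ := q
    simp only [List.cons_append, latRec, ih, List.cons_append]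
    have : s + t + sumT qs = s + sumT ((t, d) :: qs) := by simp [sumT]; ring
    rw [this]

-- the reversed countdown pass, flipped, is the forward lateness recursion.
theorem rev_eq_lat (ps : List (Int × Int)) : ∀ S : Int,
    (revRec ps.reverse S).reverse = latRec ps (S - sumT ps) := by
  induction ps using List.reverseRecOn with
  | nil => intro S; simp [revRec, latRec]
  | append_singleton qs p ih =>
    intro S
    obtain ⟨t, d⟩ := p
    have hrev : (qs ++ [((t : Int), (d : Int))]).reverse = (t, d) :: qs.reverse := by simp
    rw [hrev]
    simp only [revRec, List.reverse_cons, ih, latRec_snoc, sumT_snoc]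
    have h1 : S - t - sumT qs = S - (sumT qs + (t, d).1) := by simp; ring
    rw [h1]
    congr 2
    have h2 : max 0 (S - d) =
        if S - (sumT qs + t) + sumT qs + t > d then S - (sumT qs + t) + sumT qs + t - d else 0 := by
      split_ifs with h <;> omega
    rw [h2]

-- ===== VERDICT (by name: the statement is the Claim_ definition above) =====
theorem minimizar_latencia_spec : Claim_equal_minimizar_latencia := by
  intro L T _ _
  unfold Spec_minimizar_latencia minimizar_latencia minimizar_latencia_alt
  simp only [foldA_eq, foldB_eq, List.nil_append, rev_eq_lat, bMsort_eq, sumT, sub_self]
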